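-- pv_equiv track=rewrite | github.com/doushenyiyezhiqiu/amazon_ng_oa1 | optimize_delivery.py | optimize_delivery
-- ===== SOURCE A (Python) =====
-- from collections import Counter
--
-- def optimize_delivery(boxes):
--     count = Counter(boxes)
--     ans = 0
--     for key in count:
--         total = count[key]
--         dp = [-1]*(total + 1)
--         dp[0] = 0
--         for num in [2, 3]:
--             for i in range(num, total+1):
--                 dp[i] = dp[i-num]+1
--         if dp[-1] == -1:
--             return -1
--         else:
--             ans += dp[-1]
--     return ans
-- ===== SOURCE B (Python) =====
-- from collections import Counter
--
-- def optimize_delivery(boxes):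
--     counts = Counter(boxes).values()
--     if 1 in counts:
--         return -1
--     return sum((v + 2) // 3 for v in counts)
-- ===== Notes on version B (the rewrite author's own statement) =====
-- stated objective: simpler
-- what changed: Replaced A's per-key DP array build (two overwrite passes over a list of size count+1, with an early-return loop) by the closed form ceil(count/3) = (count+2)//3 summed over the distinct counts, after a single membership test for a count of 1.
-- intended difference: On inputs where no value occurs exactly once but some value occurs c times with c % 3 == 1 (so c >= 4), A's overwrite DP undercounts that value's trips as c//3 - 1 (e.g. 0 trips for count 4) and returns the undercounted sum; B returns the sum using ceil(c/3) = (c+2)//3, the true minimum number of boxes, which is the intended value. — e.g. on optimize_delivery([5, 5, 5, 5]): A returns 0, B returns 2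
import Mathlib
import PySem

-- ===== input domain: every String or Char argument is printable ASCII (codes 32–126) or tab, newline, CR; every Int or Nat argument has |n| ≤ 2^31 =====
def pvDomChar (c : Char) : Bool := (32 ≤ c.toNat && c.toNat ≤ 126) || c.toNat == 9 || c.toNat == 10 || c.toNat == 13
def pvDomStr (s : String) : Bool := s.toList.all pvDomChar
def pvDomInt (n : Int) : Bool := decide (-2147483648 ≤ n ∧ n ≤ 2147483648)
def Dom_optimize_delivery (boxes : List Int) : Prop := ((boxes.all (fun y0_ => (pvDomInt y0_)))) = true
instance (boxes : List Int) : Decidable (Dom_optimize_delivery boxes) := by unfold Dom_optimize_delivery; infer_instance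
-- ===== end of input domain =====

-- B replaces A's per-key DP array build by the closed form ceil(count/3) per distinct count
-- (objective: simpler); on counts ≡ 1 (mod 3) with count ≥ 4 the two differ (see D_ below).

-- ===== PORT A =====
-- 'for i in range(num, total+1): dp[i] = dp[i-num]+1'  (indices always in range: num ≤ i ≤ total = len(dp)-1, 0 ≤ i-num)
def pvDpLoop (num : Int) (total : Int) (dp : List Int) : List Int :=
  (PySem.List.pyRange num (total + 1) 1).foldl
    (fun d i => PySem.List.pySetD d i (PySem.List.pyGetD d (i - num) 0 + 1)) dp

-- dp = [-1]*(total+1); dp[0] = 0; for num in [2,3]: <inner loop>; value dp[-1]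
-- (total is a Counter count, hence ≥ 1, so dp is nonempty and dp[0], dp[-1] are in range)
def pvKeyVal (total : Int) : Int :=
  let dp := List.replicate (total + 1).toNat (-1 : Int)
  let dp := PySem.List.pySetD dp 0 0
  let dp := [(2 : Int), 3].foldl (fun d num => pvDpLoop num total d) dp
  PySem.List.pyGetD dp (-1) 0

-- 'for key in count: … ; if dp[-1] == -1: return -1 else: ans += dp[-1]'
def pvLoopA (count : PySem.Dict Int Int) : List Int → Int → Int
  | [], ans => ans
  | key :: rest, ans =>
    let total := count.getD key 0
    let last := pvKeyVal total
    if last == -1 then -1 else pvLoopA count rest (ans + last)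

def optimize_delivery (boxes : List Int) : Int :=
  let count := PySem.Dict.counter boxes
  pvLoopA count count.keys 0

-- ===== PORT B =====
-- '1 in counts' then 'sum((v + 2) // 3 for v in counts)'
def optimize_delivery_alt (boxes : List Int) : Int :=
  let counts := (PySem.Dict.counter boxes).values
  if counts.contains 1 then -1
  else (counts.map (fun v => PySem.Int.floordiv (v + 2) 3)).sum

-- ===== PRECONDITION & SPEC =====
-- On inputs where no value occurs exactly once but some value occurs c times with c % 3 == 1
-- (so c ≥ 4), A's overwrite DP undercounts that value's trips as c//3 - 1 and returns the
-- undercounted sum; B returns the sum using ceil(c/3) = (c+2)//3, the true minimum number of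
-- boxes, which is the intended value.
def D_optimize_delivery (boxes : List Int) : Prop :=
  (∀ k ∈ boxes, boxes.count k ≠ 1) ∧ (∃ k ∈ boxes, boxes.count k % 3 = 1 ∧ 4 ≤ boxes.count k)
instance (boxes : List Int) : Decidable (D_optimize_delivery boxes) := by unfold D_optimize_delivery; infer_instance

def Spec_optimize_delivery (boxes : List Int) (out : Int) : Prop :=
  ¬ D_optimize_delivery boxes → out = optimize_delivery_alt boxes
instance (boxes : List Int) (out : Int) : Decidable (Spec_optimize_delivery boxes out) := by unfold Spec_optimize_delivery; infer_instance

def pvDiffWitness_optimize_delivery : List Int := [5, 5, 5, 5]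
def pvDiffWitnessOut_optimize_delivery : Int × Int := (0, 2)

-- ===== CLAIM (what is proved, stated in full; the proofs are below) =====
def Claim_unchanged_optimize_delivery : Prop := ∀ (boxes : List Int), Dom_optimize_delivery boxes → Spec_optimize_delivery boxes (optimize_delivery boxes)
def Claim_changed_optimize_delivery : Prop := Dom_optimize_delivery (pvDiffWitness_optimize_delivery) ∧ D_optimize_delivery (pvDiffWitness_optimize_delivery) ∧ optimize_delivery (pvDiffWitness_optimize_delivery) = pvDiffWitnessOut_optimize_delivery.1 ∧ optimize_delivery_alt (pvDiffWitness_optimize_delivery) = pvDiffWitnessOut_optimize_delivery.2 ∧ pvDiffWitnessOut_optimize_delivery.1 ≠ pvDiffWitnessOut_optimize_delivery.2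
def Claim_exact_optimize_delivery : Prop := ∀ (boxes : List Int), Dom_optimize_delivery boxes → D_optimize_delivery boxes → optimize_delivery boxes ≠ optimize_delivery_alt boxes

-- ===== LEMMAS AND PROOFS =====

-- value of dp[j] after the num = 2 pass of A's inner loop
def pvF2 (j : Nat) : Int := ((j / 2 : Nat) : Int) + (if j % 2 = 1 then -1 else 0)
-- value of dp[j] after the num = 3 pass of A's inner loop
def pvF3 (j : Nat) : Int := ((j / 3 : Nat) : Int) + (if j % 3 = 1 then -1 else if j % 3 = 2 then 1 else 0)
-- B's closed form on a count of j
def pvG (j : Nat) : Int := (((j + 2) / 3 : Nat) : Int)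

lemma pvF2_rec (j : Nat) (h : 2 ≤ j) : pvF2 j = pvF2 (j - 2) + 1 := by
  unfold pvF2; split_ifs with h1 h2 h2 <;> push_cast <;> omega

lemma pvF3_rec (j : Nat) (h : 3 ≤ j) : pvF3 j = pvF3 (j - 3) + 1 := by
  unfold pvF3; split_ifs <;> push_cast <;> omega

-- the first k iterations of A's overwrite pass with step num rewrite dp[0..num+k) into f
lemma pv_pass_inv (num t : Nat) (h1 : 1 ≤ num) (f : Nat → Int)
    (hrec : ∀ j, num ≤ j → f j = f (j - num) + 1)
    (dp : List Int) (hlen : dp.length = t + 1)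
    (hbase : ∀ j, j < num → j < t + 1 → dp.getD j 0 = f j) :
    ∀ k, num + k ≤ t + 1 →
      ((PySem.List.pyRange (num : Int) ((num : Int) + (k : Int)) 1).foldl
        (fun d i => PySem.List.pySetD d i (PySem.List.pyGetD d (i - (num : Int)) 0 + 1)) dp).length = t + 1 ∧
      ∀ j, j < num + k →
        ((PySem.List.pyRange (num : Int) ((num : Int) + (k : Int)) 1).foldl
          (fun d i => PySem.List.pySetD d i (PySem.List.pyGetD d (i - (num : Int)) 0 + 1)) dp).getD j 0 = f j := by
  intro k
  induction k with
  | zero =>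
    intro hk
    rw [show ((num : Int) + (0 : Nat) : Int) = (num : Int) by push_cast; ring,
        PySem.List.pyRange_one_eq_nil le_rfl]
    exact ⟨hlen, fun j hj => hbase j (by omega) (by omega)⟩
  | succ k ih =>
    intro hk
    obtain ⟨ihlen, ihval⟩ := ih (by omega)
    rw [show ((num : Int) + ((k+1 : Nat)) : Int) = ((num : Int) + (k : Int)) + 1 by push_cast; ring,
        PySem.List.pyRange_one_succ_right (by omega), List.foldl_append]
    set R := ((PySem.List.pyRange (num : Int) ((num : Int) + (k : Int)) 1).foldl
        (fun d i => PySem.List.pySetD d i (PySem.List.pyGetD d (i - (num : Int)) 0 + 1)) dp) with hR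
    simp only [List.foldl_cons, List.foldl_nil]
    have hsub : ((num : Int) + (k : Int)) - (num : Int) = ((k : Nat) : Int) := by ring
    have hcast : ((num : Int) + (k : Int)) = (((num + k : Nat)) : Int) := by push_cast; ring
    rw [hsub, hcast, PySem.List.pyGetD_natCast, PySem.List.pySetD_natCast]
    have hgk : R.getD k 0 = f k := ihval k (by omega)
    constructor
    · simp [List.length_set, ihlen]
    · intro j hj
      rw [List.getD_eq_getElem?_getD, List.getElem?_set]
      by_cases hje : num + k = j
      · subst hje
        rw [if_pos rfl, ihlen, if_pos (by omega)]
        have := hrec (num + k) (by omega)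
        simp only [Nat.add_sub_cancel_left] at this
        rw [Option.getD_some, this, ← hgk, List.getD_eq_getElem?_getD]
      · rw [if_neg hje, ← List.getD_eq_getElem?_getD]
        exact ihval j (by omega)

lemma pv_dpLoop_spec (num t : Nat) (h1 : 1 ≤ num) (f : Nat → Int)
    (hrec : ∀ j, num ≤ j → f j = f (j - num) + 1)
    (dp : List Int) (hlen : dp.length = t + 1)
    (hbase : ∀ j, j < num → j < t + 1 → dp.getD j 0 = f j) :
    (pvDpLoop (num : Int) (t : Int) dp).length = t + 1 ∧
    ∀ j, j < t + 1 → (pvDpLoop (num : Int) (t : Int) dp).getD j 0 = f j := by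
  unfold pvDpLoop
  by_cases hle : num ≤ t + 1
  · have hup : ((t : Int) + 1) = (num : Int) + ((t + 1 - num : Nat) : Int) := by push_cast; omega
    rw [hup]
    have := pv_pass_inv num t h1 f hrec dp hlen hbase (t + 1 - num) (by omega)
    exact ⟨this.1, fun j hj => this.2 j (by omega)⟩
  · rw [PySem.List.pyRange_one_eq_nil (by push_cast; omega)]
    exact ⟨hlen, fun j hj => hbase j (by omega) hj⟩

lemma pv_keyVal_eq (t : Nat) (ht : 1 ≤ t) : pvKeyVal (t : Int) = pvF3 t := by
  unfold pvKeyVal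
  simp only [List.foldl_cons, List.foldl_nil]
  have hdp0 : PySem.List.pySetD (List.replicate ((t : Int) + 1).toNat (-1 : Int)) 0 0
      = 0 :: List.replicate t (-1 : Int) := by
    rw [show ((t : Int) + 1).toNat = t + 1 by omega]
    simp [PySem.List.pySetD_of_nonneg, List.replicate_succ]
  rw [hdp0]
  have hb2 : ∀ j, j < 2 → j < t + 1 →
      ((0 : Int) :: List.replicate t (-1 : Int)).getD j 0 = pvF2 j := by
    intro j hj hjt
    interval_cases j
    · rfl
    · have : t ≠ 0 := by omega
      cases t with
      | zero => omega
      | succ n => simp [List.replicate_succ]; decide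
  obtain ⟨hlen1, hval1⟩ := pv_dpLoop_spec 2 t (by omega) pvF2 (fun j hj => pvF2_rec j hj)
      (0 :: List.replicate t (-1 : Int)) (by simp) hb2
  simp only [Nat.cast_ofNat] at hlen1 hval1
  have hb3 : ∀ j, j < 3 → j < t + 1 →
      (pvDpLoop 2 (t : Int) (0 :: List.replicate t (-1 : Int))).getD j 0 = pvF3 j := by
    intro j hj hjt
    rw [hval1 j hjt]
    interval_cases j <;> decide
  obtain ⟨hlen2, hval2⟩ := pv_dpLoop_spec 3 t (by omega) pvF3 (fun j hj => pvF3_rec j hj)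
      _ hlen1 hb3
  simp only [Nat.cast_ofNat] at hlen2 hval2
  set dp2 := pvDpLoop 3 (t : Int) (pvDpLoop 2 (t : Int) (0 :: List.replicate t (-1 : Int)))
  have hne : dp2 ≠ [] := by
    apply List.ne_nil_of_length_pos; omega
  rw [PySem.List.pyGetD_neg_one dp2 0 hne, List.getLast_eq_getElem]
  have hvt := hval2 t (by omega)
  rw [List.getD_eq_getElem?_getD, List.getElem?_eq_getElem (by omega)] at hvt
  simp only [Option.getD_some] at hvt
  rw [← hvt]
  congr 1
  omega

lemma pvF3_eq_neg_one_iff (t : Nat) : pvF3 t = -1 ↔ t = 1 := by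
  unfold pvF3; split_ifs with h1 h2 <;> omega

-- A's key loop (early return on a count of 1) in closed form
lemma pv_loopA_spec (count : PySem.Dict Int Int) (keys : List Int) (ans : Int)
    (h : ∀ k ∈ keys, ∃ t : Nat, 1 ≤ t ∧ count.getD k 0 = (t : Int)) :
    pvLoopA count keys ans =
      if (keys.map (fun k => count.getD k 0)).contains 1 then -1
      else ans + ((keys.map (fun k => count.getD k 0)).map (fun v => pvF3 v.toNat)).sum := by
  induction keys generalizing ans with
  | nil => simp [pvLoopA]
  | cons k rest ih =>
    obtain ⟨t, ht1, htv⟩ := h k (by simp)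
    have hrest : ∀ k' ∈ rest, ∃ t : Nat, 1 ≤ t ∧ count.getD k' 0 = (t : Int) :=
      fun k' hk' => h k' (by simp [hk'])
    simp only [pvLoopA, List.map_cons, List.contains_cons]
    rw [htv, pv_keyVal_eq t ht1]
    by_cases h1 : t = 1
    · subst h1
      simp [pvF3]
    · have hne : pvF3 t ≠ -1 := fun hc => h1 ((pvF3_eq_neg_one_iff t).mp hc)
      rw [if_neg (by simpa using hne), ih (ans + pvF3 t) hrest]
      have hc : ((1 : Int) == (t : Int)) = false := by
        simp; omega
      rw [hc, Bool.false_or]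
      split_ifs with h2
      · rfl
      · rw [List.sum_cons]
        rw [show ((t : Int)).toNat = t by omega]
        ring

lemma pv_floordiv_g (t : Nat) : PySem.Int.floordiv ((t : Int) + 2) 3 = pvG t := by
  unfold pvG
  rw [show ((t : Int) + 2) = ((t + 2 : Nat) : Int) by push_cast; ring]
  exact_mod_cast PySem.Int.floordiv_natCast (t + 2) 3

lemma pvF3_eq_pvG (t : Nat) (h2 : 2 ≤ t) (hgood : ¬ (t % 3 = 1 ∧ 4 ≤ t)) : pvF3 t = pvG t := by
  unfold pvF3 pvG; split_ifs <;> push_cast <;> omega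

lemma pvF3_le_pvG (t : Nat) (h2 : 2 ≤ t) : pvF3 t ≤ pvG t := by
  unfold pvF3 pvG; split_ifs <;> push_cast <;> omega

lemma pvF3_lt_pvG (t : Nat) (hbad : t % 3 = 1 ∧ 4 ≤ t) : pvF3 t < pvG t := by
  unfold pvF3 pvG; split_ifs <;> push_cast <;> omega

lemma pv_sum_lt_sum (l : List Int) (f g : Int → Int) (h : ∀ x ∈ l, f x ≤ g x)
    (k : Int) (hk : k ∈ l) (hs : f k < g k) : (l.map f).sum < (l.map g).sum := by
  induction l with
  | nil => simp at hk
  | cons a rest ih =>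
    simp only [List.map_cons, List.sum_cons]
    have hrest_le : (rest.map f).sum ≤ (rest.map g).sum :=
      List.sum_le_sum (fun x hx => h x (List.mem_cons_of_mem a hx))
    rcases List.mem_cons.mp hk with hka | hkr
    · subst hka
      exact add_lt_add_of_lt_of_le hs hrest_le
    · exact add_lt_add_of_le_of_lt (h a (List.mem_cons_self)) (ih (fun x hx => h x (List.mem_cons_of_mem a hx)) hkr)

-- facts shared by the three verdict proofs
lemma pv_counts_fact (boxes : List Int) :
    ∀ k ∈ (PySem.Dict.counter boxes).keys,
      ∃ t : Nat, 1 ≤ t ∧ (PySem.Dict.counter boxes).getD k 0 = (t : Int) ∧ t = boxes.count k ∧ k ∈ boxes := by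
  intro k hk
  have hm : k ∈ boxes := by
    rw [PySem.Dict.keys_counter boxes] at hk
    exact (PySem.Set.mem_ofList boxes k).mp hk
  exact ⟨boxes.count k, List.count_pos_iff.mpr hm, PySem.Dict.getD_counter boxes k, rfl, hm⟩

-- ===== VERDICT (by name: the statements are the Claim_ definitions above) =====
theorem optimize_delivery_spec : Claim_unchanged_optimize_delivery := by
  intro boxes _
  unfold Spec_optimize_delivery
  intro hnD
  have hfacts := pv_counts_fact boxes
  unfold optimize_delivery optimize_delivery_alt
  rw [pv_loopA_spec _ _ 0 (fun k hk => by
        obtain ⟨t, ht1, htv, _, _⟩ := hfacts k hk; exact ⟨t, ht1, htv⟩),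
      PySem.Dict.values_eq_map_keys _ (PySem.Dict.nodup_keys_counter boxes) 0]
  set cs := ((PySem.Dict.counter boxes).keys.map (fun k => (PySem.Dict.counter boxes).getD k 0)) with hcs
  by_cases hone : cs.contains 1
  · have h1 : (1 : Int) ∈ cs := by simpa using hone
    simp [h1]
  · have hone' : (1 : Int) ∉ cs := by simpa using hone
    have hP : ∀ k ∈ boxes, boxes.count k ≠ 1 := by
      intro k hk hc1
      apply hone'
      have hkk : k ∈ (PySem.Dict.counter boxes).keys := by
        rw [PySem.Dict.keys_counter boxes]; exact (PySem.Set.mem_ofList boxes k).mpr hk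
      have : (PySem.Dict.counter boxes).getD k 0 = (1 : Int) := by
        rw [PySem.Dict.getD_counter boxes k, hc1]; rfl
      rw [hcs]
      exact this ▸ List.mem_map_of_mem hkk
    have hQ : ∀ k ∈ boxes, ¬ (boxes.count k % 3 = 1 ∧ 4 ≤ boxes.count k) := by
      intro k hk hbad
      exact hnD ⟨hP, ⟨k, hk, hbad⟩⟩
    rw [if_neg (by simpa using hone'), if_neg (by simpa using hone'), zero_add]
    congr 1
    rw [List.map_map, List.map_map]
    apply List.map_congr_left
    intro k hk
    obtain ⟨t, ht1, htv, htc, hkb⟩ := hfacts k hk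
    simp only [Function.comp_apply]
    have ht2 : 2 ≤ t := by
      rcases Nat.lt_or_ge t 2 with h | h
      · exfalso; exact hP k hkb (by omega)
      · exact h
    rw [htv, show ((t : Int)).toNat = t by omega, pv_floordiv_g t,
        pvF3_eq_pvG t ht2 (htc ▸ hQ k hkb)]

theorem optimize_delivery_changed : Claim_changed_optimize_delivery := by
  unfold Claim_changed_optimize_delivery; decide

theorem optimize_delivery_tight : Claim_exact_optimize_delivery := by
  intro boxes _ hD
  obtain ⟨hP, kb, hkb, hbad⟩ := hD
  have hfacts := pv_counts_fact boxes
  unfold optimize_delivery optimize_delivery_alt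
  rw [pv_loopA_spec _ _ 0 (fun k hk => by
        obtain ⟨t, ht1, htv, _, _⟩ := hfacts k hk; exact ⟨t, ht1, htv⟩),
      PySem.Dict.values_eq_map_keys _ (PySem.Dict.nodup_keys_counter boxes) 0]
  set cs := ((PySem.Dict.counter boxes).keys.map (fun k => (PySem.Dict.counter boxes).getD k 0)) with hcs
  have hone' : (1 : Int) ∉ cs := by
    intro hmem
    rw [hcs] at hmem
    obtain ⟨k, hk, hv⟩ := List.mem_map.mp hmem
    obtain ⟨t, ht1, htv, htc, hkbx⟩ := hfacts k hk
    rw [htv] at hv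
    have : t = 1 := by exact_mod_cast hv
    exact hP k hkbx (by omega)
  rw [if_neg (by simpa using hone'), if_neg (by simpa using hone'), zero_add]
  apply ne_of_lt
  have hmemb : ((PySem.Dict.counter boxes).getD kb 0) ∈ cs := by
    rw [hcs]
    apply List.mem_map_of_mem
    rw [PySem.Dict.keys_counter boxes]; exact (PySem.Set.mem_ofList boxes kb).mpr hkb
  apply pv_sum_lt_sum cs (fun v => pvF3 v.toNat) (fun v => PySem.Int.floordiv (v + 2) 3) ?hle
      _ hmemb ?hstrict
  case hle =>
    intro v hv
    rw [hcs] at hv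
    obtain ⟨k, hk, rfl⟩ := List.mem_map.mp hv
    obtain ⟨t, ht1, htv, htc, hkbx⟩ := hfacts k hk
    have ht2 : 2 ≤ t := by
      rcases Nat.lt_or_ge t 2 with h | h
      · exfalso; exact hP k hkbx (by omega)
      · exact h
    rw [htv]
    simp only [Int.toNat_natCast]
    rw [pv_floordiv_g t]
    exact pvF3_le_pvG t ht2
  case hstrict =>
    have hkk : kb ∈ (PySem.Dict.counter boxes).keys := by
      rw [PySem.Dict.keys_counter boxes]; exact (PySem.Set.mem_ofList boxes kb).mpr hkb
    obtain ⟨t, ht1, htv, htc, _⟩ := hfacts kb hkk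
    rw [htv]
    simp only [Int.toNat_natCast]
    rw [pv_floordiv_g t]
    exact pvF3_lt_pvG t (htc ▸ hbad)
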